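-- pv_equiv track=rewrite | github.com/ChahelPaatur/Self-Modifying-Program-Synthesis-via-Online-Library-Evolution | common/ultra_ops.py | detect_horizontal_lines
-- ===== SOURCE A (Python) =====
-- from typing import List, Dict, Tuple, Set
--
-- Grid = List[List[int]]
--
-- def detect_horizontal_lines(grid: Grid, min_length: int = 3) -> Grid:
--     """Detect horizontal lines"""
--     if not grid:
--         return grid
--
--     h, w = len(grid), len(grid[0])
--     result = [[0] * w for _ in range(h)]
--
--     for r in range(h):
--         streak = 1
--         prev_color = grid[r][0]
--         for c in range(1, w):
--             if grid[r][c] == prev_color and prev_color != 0: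
--                 streak += 1
--             else:
--                 if streak >= min_length:
--                     for i in range(c - streak, c):
--                         result[r][i] = prev_color
--                 streak = 1
--                 prev_color = grid[r][c]
--         if streak >= min_length:
--             for i in range(w - streak, w):
--                 result[r][i] = prev_color
--
--     return result
-- ===== SOURCE B (Python) =====
-- def _mark(xs, min_length):
--     """Mark one row segment recursively: peel off the leading maximal run, emit
--     it (kept if nonzero and long enough, zeroed otherwise), recurse on the rest."""
--     if not xs:
--         return []
--     color = xs[0]
--     k = 1
--     while k < len(xs) and xs[k] == color:
--         k += 1
--     rest = _mark(xs[k:], min_length)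
--     if color != 0 and k >= min_length:
--         return [color] * k + rest
--     return [0] * k + rest
--
--
-- def detect_horizontal_lines(grid, min_length=3):
--     """Detect horizontal lines (recursive run decomposition per row)."""
--     if not grid:
--         return grid
--     w = len(grid[0])
--     return [_mark(row[:w], min_length) for row in grid]
-- ===== Notes on version B (the rewrite author's own statement) =====
-- stated objective: alternative
-- what changed: Replaces A's imperative per-column streak counter with prev_color state, preallocated zero rows and in-place index fills (plus a post-loop flush) by a recursive run decomposition: each row is split into its leading maximal run and a remainder, the run is emitted as a whole block (kept or zeroed), and the function recurses on the remainder, building the output by concatenation.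
import Mathlib
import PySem

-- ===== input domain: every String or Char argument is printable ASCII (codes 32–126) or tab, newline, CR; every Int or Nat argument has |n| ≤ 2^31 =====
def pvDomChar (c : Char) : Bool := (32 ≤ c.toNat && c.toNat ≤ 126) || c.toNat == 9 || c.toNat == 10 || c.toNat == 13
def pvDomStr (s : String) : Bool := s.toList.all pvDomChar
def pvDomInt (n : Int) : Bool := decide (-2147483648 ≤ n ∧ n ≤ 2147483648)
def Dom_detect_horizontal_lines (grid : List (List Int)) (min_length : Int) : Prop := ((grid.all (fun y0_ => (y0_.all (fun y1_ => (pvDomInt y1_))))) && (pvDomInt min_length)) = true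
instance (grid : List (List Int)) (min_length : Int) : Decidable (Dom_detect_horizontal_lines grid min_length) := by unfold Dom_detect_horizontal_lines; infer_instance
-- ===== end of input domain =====

-- B replaces A's per-column streak counter with in-place index fills by a recursive run
-- decomposition of each row (leading maximal run as a block, concatenation, recursion on
-- the rest); objective: alternative decomposition, same asymptotic cost.

-- ===== PORT A =====

-- `result[r][i] = v` (the index is a nonnegative in-range position in every state Pre_ admits)
def pvSetIdx : List Int → Nat → Int → List Int
  | [], _, _ => []
  | _ :: xs, 0, v => v :: xs
  | x :: xs, n+1, v => x :: pvSetIdx xs n v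

-- `for i in range(a, b): result[r][i] = v` (a ≤ b and both are nonnegative in every reachable state)
def pvFillA (res : List Int) (a b : Nat) (v : Int) : List Int :=
  (List.range' a (b - a)).foldl (fun acc i => pvSetIdx acc i v) res

-- the `for c in range(1, w)` loop with its running (streak, prev_color, result-row) state,
-- followed by the post-loop flush; `row.getD c 0` ports the in-range read `grid[r][c]`
def pvALoop (row : List Int) (w : Nat) (ml : Int) (c : Nat) (streak : Int) (prev : Int) (res : List Int) : List Int :=
  if c < w then
    if row.getD c 0 = prev ∧ prev ≠ 0 then
      pvALoop row w ml (c+1) (streak+1) prev res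
    else
      pvALoop row w ml (c+1) 1 (row.getD c 0)
        (if streak ≥ ml then pvFillA res (c - streak.toNat) c prev else res)
  else
    if streak ≥ ml then pvFillA res (w - streak.toNat) w prev else res
termination_by w - c

def detect_horizontal_lines (grid : List (List Int)) (min_length : Int) : List (List Int) :=
  if grid = [] then grid
  else
    grid.map (fun row => pvALoop row (grid.headD []).length min_length 1 1 (row.getD 0 0)
      (List.replicate (grid.headD []).length 0))

-- ===== PORT B =====

-- needed by pvMark's termination proof
lemma pvDropWhile_lt (x : Int) (xs : List Int) :
    (xs.dropWhile (· == x)).length < (x :: xs).length := by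
  have := List.length_dropWhile_le (· == x) xs
  simp only [List.length_cons]; omega

-- `_mark`: the `while k < len(xs) and xs[k] == color` counter is the length of the leading
-- run in the tail (`takeWhile`), and `xs[k:]` is the remainder (`dropWhile`)
def pvMark (ml : Int) : List Int → List Int
  | [] => []
  | x :: xs =>
      (if x ≠ 0 ∧ (((xs.takeWhile (· == x)).length + 1 : Nat) : Int) ≥ ml then
        List.replicate ((xs.takeWhile (· == x)).length + 1) x
      else
        List.replicate ((xs.takeWhile (· == x)).length + 1) 0)
      ++ pvMark ml (xs.dropWhile (· == x))
termination_by l => l.length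
decreasing_by exact pvDropWhile_lt x xs

def detect_horizontal_lines_alt (grid : List (List Int)) (min_length : Int) : List (List Int) :=
  if grid = [] then grid
  else
    grid.map (fun row => pvMark min_length (row.take (grid.headD []).length))

-- ===== PRECONDITION & SPEC =====
-- Pre_ excludes exactly the inputs where Python A raises IndexError: a nonempty grid whose first
-- row is empty (grid[r][0] fails) or that contains a row shorter than the first row (grid[r][c] fails).
def Pre_detect_horizontal_lines (grid : List (List Int)) (min_length : Int) : Prop :=
  grid = [] ∨ (1 ≤ (grid.headD []).length ∧ ∀ row ∈ grid, (grid.headD []).length ≤ row.length)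
instance (grid : List (List Int)) (min_length : Int) : Decidable (Pre_detect_horizontal_lines grid min_length) := by
  unfold Pre_detect_horizontal_lines; infer_instance

def pvWitness_detect_horizontal_lines : List (List Int) × Int := ([[1, 1, 1, 0], [0, 2, 2, 2]], 3)

def Spec_detect_horizontal_lines (grid : List (List Int)) (min_length : Int) (out : List (List Int)) : Prop := out = detect_horizontal_lines_alt grid min_length
instance (grid : List (List Int)) (min_length : Int) (out : List (List Int)) : Decidable (Spec_detect_horizontal_lines grid min_length out) := by unfold Spec_detect_horizontal_lines; infer_instance

-- ===== CLAIM (what is proved, stated in full; the proofs are below) =====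
def Claim_equal_detect_horizontal_lines : Prop := ∀ (grid : List (List Int)) (min_length : Int), Dom_detect_horizontal_lines grid min_length → Pre_detect_horizontal_lines grid min_length → Spec_detect_horizontal_lines grid min_length (detect_horizontal_lines grid min_length)

-- ===== LEMMAS AND PROOFS =====

lemma length_pvSetIdx (xs : List Int) (i : Nat) (v : Int) : (pvSetIdx xs i v).length = xs.length := by
  induction xs generalizing i with
  | nil => rfl
  | cons x xs ih => cases i <;> simp [pvSetIdx, ih]

lemma getD_pvSetIdx (xs : List Int) (i : Nat) (v : Int) (k : Nat) :
    (pvSetIdx xs i v).getD k 0 = if k = i ∧ i < xs.length then v else xs.getD k 0 := by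
  induction xs generalizing i k with
  | nil => simp [pvSetIdx]
  | cons x xs ih =>
    cases i with
    | zero => cases k <;> simp [pvSetIdx]
    | succ n =>
      cases k with
      | zero => simp [pvSetIdx]
      | succ m => simpa [pvSetIdx, List.getD, Nat.succ_lt_succ_iff] using ih n m

lemma pvSetIdx_eq_self (xs : List Int) (i : Nat) (v : Int) (h : xs.getD i 0 = v) :
    pvSetIdx xs i v = xs := by
  induction xs generalizing i with
  | nil => rfl
  | cons x xs ih =>
    cases i with
    | zero => simp_all [pvSetIdx]
    | succ n => simp_all [pvSetIdx]

lemma getD_foldl_pvSetIdx (v : Int) (k : Nat) :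
    ∀ (l : List Nat) (res : List Int),
      (l.foldl (fun acc i => pvSetIdx acc i v) res).getD k 0 =
        if k ∈ l ∧ k < res.length then v else res.getD k 0 := by
  intro l
  induction l with
  | nil => simp
  | cons i t ih =>
    intro res
    rw [List.foldl_cons, ih, length_pvSetIdx, getD_pvSetIdx]
    by_cases h1 : k ∈ t
    · simp only [h1, true_and, List.mem_cons, or_true]
      split_ifs <;> first | rfl | omega
    · by_cases h2 : k = i <;> simp [h1, h2]
      intro hmem
      exact absurd hmem (h2 ▸ h1)

lemma length_pvFillA (res : List Int) (a b : Nat) (v : Int) :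
    (pvFillA res a b v).length = res.length := by
  unfold pvFillA
  generalize List.range' a (b - a) = l
  induction l generalizing res with
  | nil => rfl
  | cons i t ih => simp [List.foldl_cons, ih, length_pvSetIdx]

lemma getD_pvFillA (res : List Int) (a b : Nat) (v : Int) (k : Nat) (hab : a ≤ b) :
    (pvFillA res a b v).getD k 0 =
      if a ≤ k ∧ k < b ∧ k < res.length then v else res.getD k 0 := by
  rw [pvFillA, getD_foldl_pvSetIdx]
  simp only [List.mem_range'_1]
  have h : a + (b - a) = b := by omega
  rw [h]
  split_ifs <;> first | rfl | omega

-- splice form used by the proofs: take ++ replicate ++ drop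
def pvSplice (out : List Int) (c j : Nat) (v : Int) : List Int :=
  out.take c ++ List.replicate (j - c) v ++ out.drop j

lemma getD_pvSplice (out : List Int) (c j : Nat) (v : Int) (k : Nat) (hcj : c ≤ j) (hj : j ≤ out.length) :
    (pvSplice out c j v).getD k 0 = if c ≤ k ∧ k < j then v else out.getD k 0 := by
  unfold pvSplice
  simp only [List.getD, List.getElem?_append, List.length_append, List.length_take,
    List.length_replicate, Nat.min_eq_left (show c ≤ out.length by omega)]
  have h2 : c + (j - c) = j := by omega
  rw [h2]
  by_cases hk : c ≤ k ∧ k < j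
  · rw [if_pos hk, if_pos (show k < j by omega), if_neg (show ¬ k < c by omega)]
    simp [show k - c < j - c by omega]
  · rw [if_neg hk]
    by_cases h1 : k < c
    · rw [if_pos (by omega), if_pos h1]
      simp [h1]
    · rw [if_neg (show ¬ k < j by omega)]
      simp [List.getElem?_drop, show j + (k - j) = k by omega]

lemma length_pvSplice (out : List Int) (c j : Nat) (v : Int) (hcj : c ≤ j) (hj : j ≤ out.length) :
    (pvSplice out c j v).length = out.length := by
  simp [pvSplice]; omega

lemma pvFillA_eq_splice (res : List Int) (a b : Nat) (v : Int) (hab : a ≤ b) (hb : b ≤ res.length) :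
    pvFillA res a b v = res.take a ++ List.replicate (b - a) v ++ res.drop b := by
  have heq : pvFillA res a b v = pvSplice res a b v := by
    apply List.ext_getElem
    · rw [length_pvFillA, length_pvSplice res a b v hab hb]
    · intro i h1 h2
      have e1 := getD_pvFillA res a b v i hab
      have e2 := getD_pvSplice res a b v i hab hb
      rw [List.getD, List.getElem?_eq_getElem h1] at e1
      rw [List.getD, List.getElem?_eq_getElem h2] at e2
      simp only [Option.getD_some] at e1 e2
      rw [e1, e2]
      split_ifs <;> first | rfl | omega
  exact heq.trans rfl

-- residual zeros: a list that is 0 from position a on is take a ++ replicate 0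
lemma pvZeros_split (res : List Int) (a w : Nat) (hlen : res.length = w) (haw : a ≤ w)
    (hres : ∀ i, a ≤ i → i < w → res.getD i 0 = 0) :
    res = res.take a ++ List.replicate (w - a) 0 := by
  conv_lhs => rw [← List.take_append_drop a res]
  congr 1
  rw [List.eq_replicate_iff]
  constructor
  · simp [hlen]
  · intro b hb
    rw [List.mem_iff_getElem] at hb
    obtain ⟨j, hj, rfl⟩ := hb
    simp only [List.length_drop] at hj
    rw [List.getElem_drop]
    have := hres (a + j) (by omega) (by omega)
    rw [List.getD, List.getElem?_eq_getElem (by omega), Option.getD_some] at this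
    exact this

-- run structure of the scanned segment: if row[a..c) is constant = row[a], the segment from a
-- splits as that run followed by the segment from c
lemma pvSeg_decomp (row : List Int) (w a c : Nat) (hac : a ≤ c) (hcw : c ≤ w)
    (hwr : w ≤ row.length)
    (hall : ∀ k, a ≤ k → k < c → row.getD k 0 = row.getD a 0) :
    (row.take w).drop a =
      List.replicate (c - a) (row.getD a 0) ++ (row.take w).drop c := by
  conv_lhs => rw [← List.take_append_drop (c - a) ((row.take w).drop a)]
  congr 1
  · rw [List.eq_replicate_iff]
    constructor
    · simp; omega
    · intro b hb
      rw [List.mem_iff_getElem] at hb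
      obtain ⟨j, hj, rfl⟩ := hb
      simp only [List.length_take, List.length_drop, List.length_take] at hj
      rw [List.getElem_take, List.getElem_drop, List.getElem_take]
      have hj' : j < c - a := by omega
      have := hall (a + j) (by omega) (by omega)
      rw [List.getD, List.getElem?_eq_getElem (by omega), Option.getD_some] at this
      rw [this]
  · rw [List.drop_drop]
    congr 1; omega

lemma pvHeadq_drop (row : List Int) (w c : Nat) (hcw : c < w) (hwr : w ≤ row.length) :
    ((row.take w).drop c).head? = some (row.getD c 0) := by
  rw [List.head?_drop, List.getElem?_take_of_lt hcw, List.getElem?_eq_getElem (by omega)]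
  rw [List.getD, List.getElem?_eq_getElem (by omega), Option.getD_some]

-- peeling a full run off pvMark when what follows starts differently
lemma pvMark_run (ml v : Int) (k : Nat) (t : List Int) (ht : t.head? ≠ some v) :
    pvMark ml (List.replicate (k+1) v ++ t) =
      (if v ≠ 0 ∧ ((k+1 : Nat) : Int) ≥ ml then List.replicate (k+1) v
       else List.replicate (k+1) 0) ++ pvMark ml t := by
  have htw : ∀ t' : List Int, t'.head? ≠ some v →
      t'.takeWhile (· == v) = [] ∧ t'.dropWhile (· == v) = t' := by
    intro t' h
    cases t' with
    | nil => simp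
    | cons y ys =>
      have hyv : y ≠ v := by simpa using fun e => h (by simp [e])
      have hb : (y == v) = false := by simpa using hyv
      simp [List.takeWhile, List.dropWhile, hb]
  have key : ∀ k : Nat, (List.replicate k v ++ t).takeWhile (· == v) = List.replicate k v ∧
      (List.replicate k v ++ t).dropWhile (· == v) = t := by
    intro k
    induction k with
    | zero => simpa using htw t ht
    | succ n ih => simpa [List.replicate_succ, List.takeWhile, List.dropWhile] using ih
  rw [List.replicate_succ, List.cons_append, pvMark]
  rw [(key k).1, (key k).2, List.length_replicate]
  simp [List.replicate_succ]

-- a leading zero cell contributes a single zero, independently of run boundaries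
lemma pvMark_cons_zero (ml : Int) (t : List Int) :
    pvMark ml ((0 : Int) :: t) = 0 :: pvMark ml t := by
  rw [pvMark]
  simp only [ne_eq, not_true_eq_false, false_and, if_false]
  have : pvMark ml t =
      List.replicate (t.takeWhile (· == (0:Int))).length 0 ++ pvMark ml (t.dropWhile (· == (0:Int))) := by
    cases t with
    | nil => simp [pvMark]
    | cons y ys =>
      by_cases hy : y = 0
      · subst hy
        rw [pvMark]
        simp only [List.takeWhile, List.dropWhile, BEq.rfl, if_true, decide_true]
        simp [List.replicate_succ]
      · have hb : (y == (0:Int)) = false := by simpa using hy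
        simp [List.takeWhile, List.dropWhile, hb]
  rw [this, List.replicate_succ]
  simp

-- the main invariant: the A loop in state (c, streak = c-a, prev = row[a]) on a result row that
-- is still all-zero from a on produces the finished prefix plus B's marking of the rest
lemma pvMain (row : List Int) (w : Nat) (ml : Int) (hwr : w ≤ row.length) :
    ∀ n c a res, w - c = n → a < c → c ≤ w →
    (∀ k, a ≤ k → k < c → row.getD k 0 = row.getD a 0) →
    (row.getD a 0 = 0 → a + 1 = c) →
    res.length = w →
    (∀ i, a ≤ i → i < w → res.getD i 0 = 0) →
    pvALoop row w ml c ((c : Int) - (a : Int)) (row.getD a 0) res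
      = res.take a ++ pvMark ml ((row.take w).drop a) := by
  intro n
  induction n with
  | zero =>
    intro c a res hn hac hcw hall hzero hlen hres
    have hcweq : c = w := by omega
    subst hcweq
    rw [pvALoop, if_neg (lt_irrefl c)]
    have ht : c - ((c : Int) - (a : Int)).toNat = a := by omega
    rw [ht]
    have hseg : (row.take c).drop a = List.replicate (c - a) (row.getD a 0) ++ (row.take c).drop c :=
      pvSeg_decomp row c a c (by omega) le_rfl hwr hall
    have hdropc : (row.take c).drop c = [] := by
      apply List.drop_eq_nil_of_le; simp
    rw [hdropc, List.append_nil] at hseg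
    obtain ⟨k, hk⟩ : ∃ k, c - a = k + 1 := ⟨c - a - 1, by omega⟩
    have hmark : pvMark ml ((row.take c).drop a) =
        (if row.getD a 0 ≠ 0 ∧ ((k+1 : Nat) : Int) ≥ ml then List.replicate (k+1) (row.getD a 0)
         else List.replicate (k+1) 0) := by
      rw [hseg, hk]
      have h := pvMark_run ml (row.getD a 0) k [] (by simp)
      rw [List.append_nil] at h
      rw [h, pvMark, List.append_nil]
    rw [hmark]
    have hres_split : res = res.take a ++ List.replicate (c - a) 0 :=
      pvZeros_split res a c hlen (by omega) hres
    by_cases hz : row.getD a 0 = 0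
    · have hac1 : a + 1 = c := hzero hz
      have hflush : (if (c : Int) - (a : Int) ≥ ml then pvFillA res a c (row.getD a 0) else res) = res := by
        split_ifs with h
        · rw [pvFillA, show c - a = 1 by omega, List.range'_one, List.foldl_cons, List.foldl_nil]
          exact pvSetIdx_eq_self res a (row.getD a 0) (by rw [hz]; exact hres a le_rfl (by omega))
        · rfl
      rw [hflush, if_neg (show ¬(row.getD a 0 ≠ 0 ∧ ((k+1 : Nat) : Int) ≥ ml) from
        fun hcon => absurd hz hcon.1)]
      conv_lhs => rw [hres_split]
      rw [hk]
    · have hcast : ((k+1 : Nat) : Int) = (c : Int) - (a : Int) := by omega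
      by_cases hml : (c : Int) - (a : Int) ≥ ml
      · rw [if_pos hml, if_pos ⟨hz, by rw [hcast]; exact hml⟩]
        rw [pvFillA_eq_splice res a c _ (by omega) (by omega)]
        rw [List.drop_eq_nil_of_le (by omega), List.append_nil, hk]
      · rw [if_neg hml, if_neg (by rw [hcast]; intro h; exact hml h.2)]
        conv_lhs => rw [hres_split]
        rw [hk]
  | succ n ih =>
    intro c a res hn hac hcw hall hzero hlen hres
    have hcw' : c < w := by omega
    have haw : a < w := by omega
    rw [pvALoop, if_pos hcw']
    by_cases hb : row.getD c 0 = row.getD a 0 ∧ row.getD a 0 ≠ 0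
    · rw [if_pos hb]
      have harith : (c : Int) - (a : Int) + 1 = ((c+1 : Nat) : Int) - (a : Int) := by push_cast; ring
      rw [harith]
      exact ih (c+1) a res (by omega) (by omega) (by omega)
        (fun k hk1 hk2 => by
          rcases Nat.lt_succ_iff_lt_or_eq.mp hk2 with h | h
          · exact hall k hk1 h
          · subst h; exact hb.1)
        (fun hz => absurd hz hb.2) hlen hres
    · rw [if_neg hb]
      have hta : c - ((c : Int) - (a : Int)).toNat = a := by omega
      rw [hta]
      have hseg : (row.take w).drop a =
          List.replicate (c - a) (row.getD a 0) ++ (row.take w).drop c :=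
        pvSeg_decomp row w a c (by omega) (by omega) hwr hall
      by_cases hz : row.getD a 0 = 0
      · -- prev == 0 (so streak = 1): the flush writes a 0 over a 0; B emits a single 0 too
        have hac1 : a + 1 = c := hzero hz
        have hflush : (if (c : Int) - (a : Int) ≥ ml then pvFillA res a c (row.getD a 0) else res) = res := by
          split_ifs with h
          · rw [pvFillA, show c - a = 1 by omega, List.range'_one, List.foldl_cons, List.foldl_nil]
            exact pvSetIdx_eq_self res a (row.getD a 0) (by rw [hz]; exact hres a le_rfl (by omega))
          · rfl
        rw [hflush]
        have lhs := ih (c+1) c res (by omega) (by omega) (by omega)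
          (fun k hk1 hk2 => by rw [show k = c by omega])
          (fun _ => rfl) hlen (fun i hi1 hi2 => hres i (by omega) hi2)
        have harith : ((c+1 : Nat) : Int) - (c : Int) = 1 := by push_cast; ring
        rw [harith] at lhs
        rw [lhs]
        have hmark : pvMark ml ((row.take w).drop a) = 0 :: pvMark ml ((row.take w).drop c) := by
          rw [hseg, show c - a = 1 by omega, hz]
          simpa using pvMark_cons_zero ml ((row.take w).drop c)
        rw [hmark]
        have htk : res.take c = res.take a ++ [(0 : Int)] := by
          rw [show c = a + 1 by omega, List.take_add_one]
          congr 1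
          have := hres a le_rfl (by omega)
          rw [List.getD, List.getElem?_eq_getElem (by omega), Option.getD_some] at this
          rw [List.getElem?_eq_getElem (by omega)]
          simp [this]
        rw [htk]
        simp
      · -- prev ≠ 0 and the run breaks at c
        have hcur : row.getD c 0 ≠ row.getD a 0 := fun h => hb ⟨h, hz⟩
        obtain ⟨k, hk⟩ : ∃ k, c - a = k + 1 := ⟨c - a - 1, by omega⟩
        have hheadq : ((row.take w).drop c).head? ≠ some (row.getD a 0) := by
          rw [pvHeadq_drop row w c hcw' hwr]
          simpa using hcur
        have hmark : pvMark ml ((row.take w).drop a) =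
            (if row.getD a 0 ≠ 0 ∧ ((k+1 : Nat) : Int) ≥ ml then List.replicate (k+1) (row.getD a 0)
             else List.replicate (k+1) 0) ++ pvMark ml ((row.take w).drop c) := by
          rw [hseg, hk]
          exact pvMark_run ml (row.getD a 0) k _ hheadq
        have hcast : ((k+1 : Nat) : Int) = (c : Int) - (a : Int) := by omega
        set res' := if (c : Int) - (a : Int) ≥ ml then pvFillA res a c (row.getD a 0) else res with hres'def
        have hlen' : res'.length = w := by
          rw [hres'def]; split_ifs
          · rw [length_pvFillA]; exact hlen
          · exact hlen
        have hres0' : ∀ i, c ≤ i → i < w → res'.getD i 0 = 0 := by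
          intro i hi1 hi2
          rw [hres'def]; split_ifs with h
          · rw [getD_pvFillA res a c _ i (by omega), if_neg (by omega)]
            exact hres i (by omega) hi2
          · exact hres i (by omega) hi2
        have lhs := ih (c+1) c res' (by omega) (by omega) (by omega)
          (fun k hk1 hk2 => by rw [show k = c by omega])
          (fun _ => rfl) hlen' hres0'
        have harith : ((c+1 : Nat) : Int) - (c : Int) = 1 := by push_cast; ring
        rw [harith] at lhs
        rw [lhs, hmark]
        have htk : res'.take c =
            res.take a ++ (if row.getD a 0 ≠ 0 ∧ ((k+1 : Nat) : Int) ≥ ml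
              then List.replicate (k+1) (row.getD a 0) else List.replicate (k+1) 0) := by
          by_cases hml : (c : Int) - (a : Int) ≥ ml
          · rw [hres'def, if_pos hml, if_pos ⟨hz, by rw [hcast]; exact hml⟩]
            rw [pvFillA_eq_splice res a c _ (by omega) (by omega)]
            rw [← hk]
            have hlen1 : (res.take a ++ List.replicate (c - a) (row.getD a 0)).length = c := by
              simp [hlen]; omega
            rw [List.take_append_of_le_length (le_of_eq hlen1.symm),
              List.take_of_length_le (le_of_eq hlen1)]
          · rw [hres'def, if_neg hml, if_neg (by rw [hcast]; intro h; exact hml h.2)]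
            rw [show c = a + (c - a) by omega, List.take_add]
            congr 1
            rw [← hk, List.eq_replicate_iff]
            constructor
            · simp [hlen]; omega
            · intro b hb'
              rw [List.mem_iff_getElem] at hb'
              obtain ⟨j, hj, rfl⟩ := hb'
              simp only [List.length_take, List.length_drop] at hj
              rw [List.getElem_take, List.getElem_drop]
              have := hres (a + j) (by omega) (by omega)
              rw [List.getD, List.getElem?_eq_getElem (by omega), Option.getD_some] at this
              exact this
        rw [htk, List.append_assoc]

-- A = B row by row: start pvMain at c = 1, a = 0 on the all-zero result row
lemma pvRow (row : List Int) (w : Nat) (ml : Int) (hw : 1 ≤ w) (hwr : w ≤ row.length) :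
    pvALoop row w ml 1 1 (row.getD 0 0) (List.replicate w 0) = pvMark ml (row.take w) := by
  have h := pvMain row w ml hwr (w - 1) 1 0 (List.replicate w 0) (by omega) (by omega) (by omega)
    (fun k hk1 hk2 => by rw [show k = 0 by omega])
    (fun _ => rfl) (by simp)
    (fun i _ _ => by simp [List.getD])
  simpa using h

-- ===== VERDICT (by name: the statement is the Claim_ definition above) =====
theorem detect_horizontal_lines_spec : Claim_equal_detect_horizontal_lines := by
  intro grid ml _ hPre
  unfold Spec_detect_horizontal_lines detect_horizontal_lines detect_horizontal_lines_alt
  by_cases hg : grid = []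
  · simp [hg]
  · rw [if_neg hg, if_neg hg]
    apply List.map_congr_left
    intro row hrow
    rcases hPre with h | ⟨hw1, hall⟩
    · exact absurd h hg
    · exact pvRow row (grid.headD []).length ml hw1 (hall row hrow)
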